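-- pv_equiv track=rewrite | github.com/pypi-data/pypi-mirror-125 | packages/wwvb/wwvb-2.0.0.tar.gz/wwvb-2.0.0/wwvb/__init__.py | hamming_parity
-- ===== SOURCE A (Python) =====
-- hamming_weight = [
--     [23, 21, 20, 17, 16, 15, 14, 13, 9, 8, 6, 5, 4, 2, 0],
--     [24, 22, 21, 18, 17, 16, 15, 14, 10, 9, 7, 6, 5, 3, 1],
--     [25, 23, 22, 19, 18, 17, 16, 15, 11, 10, 8, 7, 6, 4, 2],
--     [24, 21, 19, 18, 15, 14, 13, 12, 11, 7, 6, 4, 3, 2, 0],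
--     [25, 22, 20, 19, 16, 15, 14, 13, 12, 8, 7, 5, 4, 3, 1],
-- ]
--
-- def extract_bit(v: int, p: int) -> bool:
--     """Extract bit 'p' from integer 'v' as a bool"""
--     return bool((v >> p) & 1)
--
-- def hamming_parity(value: int) -> int:
--     """Compute the "hamming parity" of a 26-bit number, such as the minute-of-century [See Enhanced WWVB Broadcast Format 4.3]"""
--     parity = 0
--     for i in range(4, -1, -1):
--         bit = 0
--         for j in range(0, 15):
--             bit ^= extract_bit(value, hamming_weight[i][j])
--         parity = (parity << 1) | bit
--     return parity
-- ===== SOURCE B (Python) =====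
-- hamming_weight = [
--     [23, 21, 20, 17, 16, 15, 14, 13, 9, 8, 6, 5, 4, 2, 0],
--     [24, 22, 21, 18, 17, 16, 15, 14, 10, 9, 7, 6, 5, 3, 1],
--     [25, 23, 22, 19, 18, 17, 16, 15, 11, 10, 8, 7, 6, 4, 2],
--     [24, 21, 19, 18, 15, 14, 13, 12, 11, 7, 6, 4, 3, 2, 0],
--     [25, 22, 20, 19, 16, 15, 14, 13, 12, 8, 7, 5, 4, 3, 1],
-- ]
--
-- # One bitmask per row: positions within a row are distinct, so the XOR of the
-- # selected bits equals the parity of the popcount of the masked value.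
-- _masks = [sum(1 << p for p in row) for row in hamming_weight]
--
-- def hamming_parity(value: int) -> int:
--     parity = 0
--     for mask in reversed(_masks):
--         parity = (parity << 1) | ((value & mask).bit_count() & 1)
--     return parity
-- ===== Notes on version B (the rewrite author's own statement) =====
-- stated objective: simpler
-- what changed: Replaced A's inner per-bit extraction-and-XOR loop with a precomputed per-row bitmask and a single masked popcount-parity step (parity of distinct selected bits = popcount of the masked value mod 2).
import Mathlib
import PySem

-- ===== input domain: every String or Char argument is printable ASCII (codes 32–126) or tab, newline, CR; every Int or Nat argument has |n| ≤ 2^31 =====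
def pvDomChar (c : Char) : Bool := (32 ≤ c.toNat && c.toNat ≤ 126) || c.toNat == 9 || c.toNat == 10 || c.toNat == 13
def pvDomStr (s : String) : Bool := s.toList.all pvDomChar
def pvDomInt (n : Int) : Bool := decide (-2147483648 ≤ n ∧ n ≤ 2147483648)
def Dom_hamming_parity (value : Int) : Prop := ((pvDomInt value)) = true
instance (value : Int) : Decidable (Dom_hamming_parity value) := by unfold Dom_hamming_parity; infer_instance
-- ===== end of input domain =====

-- B replaces A's inner per-bit loop by a single mask-and-popcount per row
-- (XOR of distinct selected bits = parity of the popcount of the masked value); same results, simpler per-row step.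

-- ===== PORT A =====
def hamming_weight : List (List Int) :=
  [[23, 21, 20, 17, 16, 15, 14, 13, 9, 8, 6, 5, 4, 2, 0],
   [24, 22, 21, 18, 17, 16, 15, 14, 10, 9, 7, 6, 5, 3, 1],
   [25, 23, 22, 19, 18, 17, 16, 15, 11, 10, 8, 7, 6, 4, 2],
   [24, 21, 19, 18, 15, 14, 13, 12, 11, 7, 6, 4, 3, 2, 0],
   [25, 22, 20, 19, 16, 15, 14, 13, 12, 8, 7, 5, 4, 3, 1]]

-- bool((v >> p) & 1); '.toNat' on the shift amount is exact here: every p this program passes is a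
-- nonnegative table literal (Python raises on a negative shift, which never occurs).
def extract_bit (v : Int) (p : Int) : Bool := PySem.Int.band (v >>> p.toNat) 1 ≠ 0

def hamming_parity (value : Int) : Int :=
  (PySem.List.pyRange 4 (-1) (-1)).foldl (fun parity i =>
    let bit := (PySem.List.pyRange 0 15 1).foldl (fun bit j =>
      PySem.Int.bxor bit
        (if extract_bit value (PySem.List.pyGetD (PySem.List.pyGetD hamming_weight i []) j 0) then 1 else 0)) 0
    PySem.Int.bor (parity <<< (1 : Nat)) bit) 0

-- ===== PORT B =====
def pvMasks : List Int := hamming_weight.map (fun row => (row.map (fun p => (1 : Int) <<< p.toNat)).sum)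

-- (value & mask).bit_count() is PySem.Int.bitCount of the masked value (exact: bit_count reads |n|).
def hamming_parity_alt (value : Int) : Int :=
  pvMasks.reverse.foldl (fun parity mask =>
    PySem.Int.bor (parity <<< (1 : Nat))
      (PySem.Int.band ((PySem.Int.bitCount (PySem.Int.band value mask) : Nat) : Int) 1)) 0

-- ===== PRECONDITION & SPEC =====
def Spec_hamming_parity (value : Int) (out : Int) : Prop := out = hamming_parity_alt value
instance (value : Int) (out : Int) : Decidable (Spec_hamming_parity value out) := by unfold Spec_hamming_parity; infer_instance

-- ===== CLAIM (what is proved, stated in full; the proofs are below) =====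
def Claim_equal_hamming_parity : Prop := ∀ (value : Int), Dom_hamming_parity value → Spec_hamming_parity value (hamming_parity value)

-- ===== LEMMAS AND PROOFS =====

-- Binary recurrence of Nat `&&&`.
theorem pvNatAndRec (n m : Nat) : n &&& m = (n % 2) * (m % 2) + 2 * ((n / 2) &&& (m / 2)) := by
  have h1 : (n &&& m) / 2 = (n / 2) &&& (m / 2) := Nat.and_div_two
  have h2 : (n &&& m) % 2 = (n % 2) * (m % 2) := by
    rw [← Nat.and_one_is_mod (n &&& m), Nat.and_assoc]
    rcases Nat.mod_two_eq_zero_or_one n with h|h <;> rcases Nat.mod_two_eq_zero_or_one m with h2|h2 <;>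
      simp [← Nat.and_one_is_mod, Nat.and_one_is_mod n ▸ h, Nat.and_one_is_mod m ▸ h2]
  omega

theorem pvBandOfNat (k m : Nat) : PySem.Int.band (Int.ofNat k) ((m : Nat) : Int) = ((k &&& m : Nat) : Int) := by
  simp only [PySem.Int.band]
  norm_num

theorem pvBandNegSucc (k m : Nat) : PySem.Int.band (Int.negSucc k) ((m : Nat) : Int) = ((m - (m &&& k) : Nat) : Int) := by
  simp only [PySem.Int.band]
  have h1 : ¬ ((0:Int) ≤ Int.negSucc k) := of_decide_eq_false rfl
  have h2 : (0:Int) ≤ (m : Int) := Int.natCast_nonneg m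
  rw [if_neg h1, if_pos h2]
  norm_num

-- Binary recurrence of Python `&` against a nonnegative mask, for ANY Int value.
theorem pvBandRec (v : Int) (m : Nat) :
    PySem.Int.band v ((m : Nat) : Int) =
      (((m % 2) * (PySem.Int.band v 1).toNat : Nat) : Int) + 2 * PySem.Int.band (v >>> (1:Nat)) (((m / 2 : Nat)) : Int) := by
  cases v with
  | ofNat k =>
    have hs : (Int.ofNat k) >>> (1:Nat) = Int.ofNat (k >>> 1) := rfl
    rw [pvBandOfNat, hs, pvBandOfNat]
    have hb : PySem.Int.band (Int.ofNat k) 1 = ((k &&& 1 : Nat) : Int) := pvBandOfNat k 1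
    rw [hb]
    have h1 := pvNatAndRec k m
    have h4 : k &&& 1 = k % 2 := Nat.and_one_is_mod k
    have h5 : k >>> 1 = k / 2 := Nat.shiftRight_one k
    have ht : ((k &&& 1 : Nat) : Int).toNat = k &&& 1 := Int.toNat_natCast _
    rw [ht, h4, h5]
    have goal : k &&& m = m % 2 * (k % 2) + 2 * (k / 2 &&& m / 2) := by
      rcases Nat.mod_two_eq_zero_or_one m with h|h <;> rcases Nat.mod_two_eq_zero_or_one k with h'|h' <;>
        simp [h, h'] at h1 ⊢ <;> omega
    exact_mod_cast goal
  | negSucc k =>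
    have hs : (Int.negSucc k) >>> (1:Nat) = Int.negSucc (k >>> 1) := rfl
    rw [pvBandNegSucc, hs, pvBandNegSucc]
    have hb : PySem.Int.band (Int.negSucc k) 1 = ((1 - (1 &&& k) : Nat) : Int) := pvBandNegSucc k 1
    rw [hb, Int.toNat_natCast]
    have h1 := pvNatAndRec m k
    have h2 : m / 2 &&& k / 2 ≤ m / 2 := Nat.and_le_left
    have h3 : m &&& k ≤ m := Nat.and_le_left
    have h4 : 1 &&& k = k % 2 := by rw [Nat.and_comm]; exact Nat.and_one_is_mod k
    have h5 : k >>> 1 = k / 2 := Nat.shiftRight_one k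
    rw [h4, h5]
    push_cast
    rcases Nat.mod_two_eq_zero_or_one m with h|h <;> rcases Nat.mod_two_eq_zero_or_one k with h'|h' <;>
      simp [h, h'] at h1 ⊢ <;> omega

-- Reference bit-sum: the number of 1-bits of `v & m`, accumulated bit by bit of the mask.
def pvBitsum (v : Int) (m : Nat) : Nat :=
  if m = 0 then 0
  else (m % 2) * (PySem.Int.band v 1).toNat + pvBitsum (v >>> (1:Nat)) (m / 2)
decreasing_by exact Nat.div_lt_self (Nat.pos_of_ne_zero (by assumption)) (by norm_num)

theorem pvBandOneCases (v : Int) : PySem.Int.band v 1 = 0 ∨ PySem.Int.band v 1 = 1 := by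
  have h := PySem.Int.band_one v
  have h1 : 0 ≤ PySem.Int.mod v 2 := PySem.Int.mod_nonneg v (by norm_num)
  have h2 : PySem.Int.mod v 2 < 2 := PySem.Int.mod_lt v (by norm_num)
  omega

theorem pvBandCastNonneg (v : Int) (m : Nat) : 0 ≤ PySem.Int.band v ((m:Nat) : Int) := by
  rw [PySem.Int.band_comm]
  exact PySem.Int.band_nonneg_of_nonneg_left v (Int.natCast_nonneg m)

-- Popcount of a masked value equals the reference bit-sum.
theorem pvBitCountBand (m : Nat) (v : Int) :
    PySem.Int.bitCount (PySem.Int.band v ((m:Nat) : Int)) = pvBitsum v m := by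
  induction m using Nat.strong_induction_on generalizing v with
  | _ m ih =>
    by_cases h0 : m = 0
    · subst h0; simp [pvBitsum]
    · have hrec := pvBandRec v m
      set wI := PySem.Int.band (v >>> (1:Nat)) (((m / 2 : Nat)) : Int) with hw
      have hwnn : 0 ≤ wI := pvBandCastNonneg _ _
      obtain ⟨wn, hwn⟩ : ∃ wn : Nat, wI = (wn : Int) := ⟨wI.toNat, (Int.toNat_of_nonneg hwnn).symm⟩
      set c := (m % 2) * (PySem.Int.band v 1).toNat with hc
      have hcle : c ≤ 1 := by
        rcases pvBandOneCases v with h|h <;> rcases Nat.mod_two_eq_zero_or_one m with h'|h' <;>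
          simp [hc, h, h']
      have hband : PySem.Int.band v ((m:Nat) : Int) = ((c + 2 * wn : Nat) : Int) := by
        rw [hrec, hwn]; push_cast; ring
      rw [hband]
      have hIH : PySem.Int.bitCount ((wn : Nat) : Int) = pvBitsum (v >>> (1:Nat)) (m / 2) := by
        rw [← hwn, hw]; exact ih (m / 2) (Nat.div_lt_self (Nat.pos_of_ne_zero h0) (by norm_num)) (v >>> (1:Nat))
      have hbs : pvBitsum v m = c + pvBitsum (v >>> (1:Nat)) (m / 2) := by
        rw [pvBitsum, if_neg h0]
      by_cases hz : c + 2 * wn = 0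
      · have hc0 : c = 0 := by omega
        have hw0 : wn = 0 := by omega
        rw [hw0] at hIH
        rw [hz, hbs, hc0]
        simpa using hIH
      · rw [PySem.Int.bitCount_natCast (Nat.pos_of_ne_zero hz)]
        have h1 : (c + 2 * wn) % 2 = c := by omega
        have h2 : (c + 2 * wn) / 2 = wn := by omega
        rw [h1, h2, hIH, hbs]

-- Single-bit helper: ((v >> p) & 1) as a Nat.
def pvBitI (v : Int) (p : Int) : Nat := (PySem.Int.band (v >>> p.toNat) 1).toNat

theorem pvBit01 (v p : Int) : pvBitI v p ≤ 1 := by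
  unfold pvBitI
  rcases pvBandOneCases (v >>> p.toNat) with h|h <;> rw [h] <;> decide

theorem pvIteBit (v p : Int) : (if extract_bit v p then (1:Int) else 0) = ((pvBitI v p : Nat) : Int) := by
  unfold extract_bit pvBitI
  rcases pvBandOneCases (v >>> p.toNat) with h|h <;> rw [h] <;> decide

theorem pvBxorCast (a b : Nat) (ha : a ≤ 1) (hb : b ≤ 1) :
    PySem.Int.bxor (a : Int) (b : Int) = (((a + b) % 2 : Nat) : Int) := by
  interval_cases a <;> interval_cases b <;> decide

-- An XOR-accumulation of single bits is the parity of their sum.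
theorem pvFoldlBxorSum (v : Int) (l : List Int) (a : Nat) :
    l.foldl (fun bit p => PySem.Int.bxor bit (if extract_bit v p then 1 else 0)) ((a % 2 : Nat) : Int)
      = (((a + (l.map (pvBitI v)).sum) % 2 : Nat) : Int) := by
  induction l generalizing a with
  | nil => simp
  | cons p t ih =>
    simp only [List.foldl_cons, List.map_cons, List.sum_cons]
    rw [pvIteBit, pvBxorCast (a % 2) (pvBitI v p) (Nat.le_of_lt_succ (Nat.mod_lt a (by norm_num))) (pvBit01 v p)]
    rw [show (a % 2 + pvBitI v p) % 2 = (a + pvBitI v p) % 2 from by omega, ih]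
    congr 1
    omega

theorem pvFoldlBxorSum0 (v : Int) (l : List Int) :
    l.foldl (fun bit p => PySem.Int.bxor bit (if extract_bit v p then 1 else 0)) (0 : Int)
      = ((((l.map (pvBitI v)).sum) % 2 : Nat) : Int) := by
  have h := pvFoldlBxorSum v l 0
  rw [Nat.zero_mod, Nat.cast_zero, Nat.zero_add] at h
  exact h

theorem pvBandCastOne (n : Nat) : PySem.Int.band ((n : Nat) : Int) 1 = ((n % 2 : Nat) : Int) := by
  rw [PySem.Int.band_one]
  exact_mod_cast PySem.Int.mod_natCast n 2

theorem pvRow0 (v : Int) :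
    (PySem.List.pyRange 0 15 1).foldl (fun bit j =>
      PySem.Int.bxor bit
        (if extract_bit v (PySem.List.pyGetD (PySem.List.pyGetD hamming_weight 0 []) j 0) then 1 else 0)) 0
    = PySem.Int.band ((PySem.Int.bitCount (PySem.Int.band v 11789173) : Nat) : Int) 1 := by
  have hrow : PySem.List.pyGetD hamming_weight 0 [] = [23, 21, 20, 17, 16, 15, 14, 13, 9, 8, 6, 5, 4, 2, 0] := by decide
  rw [hrow]
  rw [show PySem.List.pyRange 0 15 1 = PySem.List.pyRange 0 (PySem.List.len (([23, 21, 20, 17, 16, 15, 14, 13, 9, 8, 6, 5, 4, 2, 0] : List Int))) from by decide]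
  rw [PySem.List.foldl_pyRange_pyGetD ([23, 21, 20, 17, 16, 15, 14, 13, 9, 8, 6, 5, 4, 2, 0] : List Int) 0
      (fun bit p => PySem.Int.bxor bit (if extract_bit v p then 1 else 0)) 0 le_rfl]
  simp only [Int.toNat_zero, List.drop_zero]
  rw [pvFoldlBxorSum0]
  rw [show (11789173 : Int) = ((11789173 : Nat) : Int) from by norm_num]
  rw [pvBandCastOne, pvBitCountBand]
  rw [Int.natCast_inj]
  simp [pvBitsum, pvBitI, List.map, Int.toNat]
  simp only [← Int.shiftRight_add]
  norm_num
  omega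

theorem pvRow1 (v : Int) :
    (PySem.List.pyRange 0 15 1).foldl (fun bit j =>
      PySem.Int.bxor bit
        (if extract_bit v (PySem.List.pyGetD (PySem.List.pyGetD hamming_weight 1 []) j 0) then 1 else 0)) 0
    = PySem.Int.band ((PySem.Int.bitCount (PySem.Int.band v 23578346) : Nat) : Int) 1 := by
  have hrow : PySem.List.pyGetD hamming_weight 1 [] = [24, 22, 21, 18, 17, 16, 15, 14, 10, 9, 7, 6, 5, 3, 1] := by decide
  rw [hrow]
  rw [show PySem.List.pyRange 0 15 1 = PySem.List.pyRange 0 (PySem.List.len (([24, 22, 21, 18, 17, 16, 15, 14, 10, 9, 7, 6, 5, 3, 1] : List Int))) from by decide]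
  rw [PySem.List.foldl_pyRange_pyGetD ([24, 22, 21, 18, 17, 16, 15, 14, 10, 9, 7, 6, 5, 3, 1] : List Int) 0
      (fun bit p => PySem.Int.bxor bit (if extract_bit v p then 1 else 0)) 0 le_rfl]
  simp only [Int.toNat_zero, List.drop_zero]
  rw [pvFoldlBxorSum0]
  rw [show (23578346 : Int) = ((23578346 : Nat) : Int) from by norm_num]
  rw [pvBandCastOne, pvBitCountBand]
  rw [Int.natCast_inj]
  simp [pvBitsum, pvBitI, List.map, Int.toNat]
  simp only [← Int.shiftRight_add]
  norm_num
  omega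

theorem pvRow2 (v : Int) :
    (PySem.List.pyRange 0 15 1).foldl (fun bit j =>
      PySem.Int.bxor bit
        (if extract_bit v (PySem.List.pyGetD (PySem.List.pyGetD hamming_weight 2 []) j 0) then 1 else 0)) 0
    = PySem.Int.band ((PySem.Int.bitCount (PySem.Int.band v 47156692) : Nat) : Int) 1 := by
  have hrow : PySem.List.pyGetD hamming_weight 2 [] = [25, 23, 22, 19, 18, 17, 16, 15, 11, 10, 8, 7, 6, 4, 2] := by decide
  rw [hrow]
  rw [show PySem.List.pyRange 0 15 1 = PySem.List.pyRange 0 (PySem.List.len (([25, 23, 22, 19, 18, 17, 16, 15, 11, 10, 8, 7, 6, 4, 2] : List Int))) from by decide]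
  rw [PySem.List.foldl_pyRange_pyGetD ([25, 23, 22, 19, 18, 17, 16, 15, 11, 10, 8, 7, 6, 4, 2] : List Int) 0
      (fun bit p => PySem.Int.bxor bit (if extract_bit v p then 1 else 0)) 0 le_rfl]
  simp only [Int.toNat_zero, List.drop_zero]
  rw [pvFoldlBxorSum0]
  rw [show (47156692 : Int) = ((47156692 : Nat) : Int) from by norm_num]
  rw [pvBandCastOne, pvBitCountBand]
  rw [Int.natCast_inj]
  simp [pvBitsum, pvBitI, List.map, Int.toNat]
  simp only [← Int.shiftRight_add]
  norm_num
  omega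

theorem pvRow3 (v : Int) :
    (PySem.List.pyRange 0 15 1).foldl (fun bit j =>
      PySem.Int.bxor bit
        (if extract_bit v (PySem.List.pyGetD (PySem.List.pyGetD hamming_weight 3 []) j 0) then 1 else 0)) 0
    = PySem.Int.band ((PySem.Int.bitCount (PySem.Int.band v 19724509) : Nat) : Int) 1 := by
  have hrow : PySem.List.pyGetD hamming_weight 3 [] = [24, 21, 19, 18, 15, 14, 13, 12, 11, 7, 6, 4, 3, 2, 0] := by decide
  rw [hrow]
  rw [show PySem.List.pyRange 0 15 1 = PySem.List.pyRange 0 (PySem.List.len (([24, 21, 19, 18, 15, 14, 13, 12, 11, 7, 6, 4, 3, 2, 0] : List Int))) from by decide]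
  rw [PySem.List.foldl_pyRange_pyGetD ([24, 21, 19, 18, 15, 14, 13, 12, 11, 7, 6, 4, 3, 2, 0] : List Int) 0
      (fun bit p => PySem.Int.bxor bit (if extract_bit v p then 1 else 0)) 0 le_rfl]
  simp only [Int.toNat_zero, List.drop_zero]
  rw [pvFoldlBxorSum0]
  rw [show (19724509 : Int) = ((19724509 : Nat) : Int) from by norm_num]
  rw [pvBandCastOne, pvBitCountBand]
  rw [Int.natCast_inj]
  simp [pvBitsum, pvBitI, List.map, Int.toNat]
  simp only [← Int.shiftRight_add]
  norm_num
  omega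

theorem pvRow4 (v : Int) :
    (PySem.List.pyRange 0 15 1).foldl (fun bit j =>
      PySem.Int.bxor bit
        (if extract_bit v (PySem.List.pyGetD (PySem.List.pyGetD hamming_weight 4 []) j 0) then 1 else 0)) 0
    = PySem.Int.band ((PySem.Int.bitCount (PySem.Int.band v 39449018) : Nat) : Int) 1 := by
  have hrow : PySem.List.pyGetD hamming_weight 4 [] = [25, 22, 20, 19, 16, 15, 14, 13, 12, 8, 7, 5, 4, 3, 1] := by decide
  rw [hrow]
  rw [show PySem.List.pyRange 0 15 1 = PySem.List.pyRange 0 (PySem.List.len (([25, 22, 20, 19, 16, 15, 14, 13, 12, 8, 7, 5, 4, 3, 1] : List Int))) from by decide]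
  rw [PySem.List.foldl_pyRange_pyGetD ([25, 22, 20, 19, 16, 15, 14, 13, 12, 8, 7, 5, 4, 3, 1] : List Int) 0
      (fun bit p => PySem.Int.bxor bit (if extract_bit v p then 1 else 0)) 0 le_rfl]
  simp only [Int.toNat_zero, List.drop_zero]
  rw [pvFoldlBxorSum0]
  rw [show (39449018 : Int) = ((39449018 : Nat) : Int) from by norm_num]
  rw [pvBandCastOne, pvBitCountBand]
  rw [Int.natCast_inj]
  simp [pvBitsum, pvBitI, List.map, Int.toNat]
  simp only [← Int.shiftRight_add]
  norm_num
  omega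

theorem hamming_parity_eq_alt (v : Int) : hamming_parity v = hamming_parity_alt v := by
  unfold hamming_parity hamming_parity_alt
  rw [show PySem.List.pyRange 4 (-1) (-1) = [4,3,2,1,0] from by decide]
  rw [show pvMasks.reverse = [39449018, 19724509, 47156692, 23578346, 11789173] from by decide]
  simp only [List.foldl_cons, List.foldl_nil]
  rw [pvRow0, pvRow1, pvRow2, pvRow3, pvRow4]

-- ===== VERDICT (by name: the statement is the Claim_ definition above) =====
theorem hamming_parity_spec : Claim_equal_hamming_parity := by
  intro value _
  unfold Spec_hamming_parity
  exact hamming_parity_eq_alt value
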